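-- pv_equiv track=rewrite | github.com/merrymercy/atlas | scripts/gen_data.py | get_used_functions
-- ===== SOURCE A (Python) =====
-- def get_used_functions(seqs):
--     used_funcs = set()
--     ret = []
--     for funcs, _ in seqs:
--         for func in funcs:
--             if func not in used_funcs:
--                 used_funcs.add(func)
--                 ret.append(func)
--     return ret
-- ===== SOURCE B (Python) =====
-- def get_used_functions(seqs):
--     flat = [func for funcs, _ in seqs for func in funcs]
--     first = {}
--     for i, func in reversed(list(enumerate(flat))):
--         first[func] = i
--     return [func for func, _ in sorted(first.items(), key=lambda kv: kv[1])]
-- ===== Notes on version B (the rewrite author's own statement) =====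
-- stated objective: alternative
-- what changed: Replaces the seen-set plus ordered result-list accumulation with a different algorithm: a backward pass over the enumerated flattened list records each function's first index in a dict, and the result is the dict entries sorted by that first index.
import Mathlib
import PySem

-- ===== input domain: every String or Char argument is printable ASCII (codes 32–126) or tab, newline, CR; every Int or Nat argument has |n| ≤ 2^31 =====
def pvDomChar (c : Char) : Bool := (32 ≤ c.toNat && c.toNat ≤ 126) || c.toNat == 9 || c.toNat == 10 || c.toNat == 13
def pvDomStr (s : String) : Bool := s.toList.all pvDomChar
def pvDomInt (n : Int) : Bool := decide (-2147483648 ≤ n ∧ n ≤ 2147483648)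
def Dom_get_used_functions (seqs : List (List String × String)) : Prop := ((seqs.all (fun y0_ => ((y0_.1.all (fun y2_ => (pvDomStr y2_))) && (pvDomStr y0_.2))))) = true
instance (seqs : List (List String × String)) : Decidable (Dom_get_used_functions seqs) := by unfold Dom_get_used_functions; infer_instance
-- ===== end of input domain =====

-- B replaces the seen-set + ordered accumulation with a backward pass recording each function's
-- first index in a dict, then sorting the entries by that index (alternative algorithm).
-- ===== PORT A =====
def get_used_functions (seqs : List (List String × String)) : List String :=
  -- for funcs, _ in seqs: for func in funcs: if func not in used_funcs: add; append
  (seqs.foldl (fun (st : PySem.Set String × List String) p =>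
    p.1.foldl (fun (st : PySem.Set String × List String) func =>
      if PySem.Set.contains st.1 func then st else (PySem.Set.add st.1 func, st.2 ++ [func])) st)
    (PySem.Set.empty, [])).2

-- ===== PORT B =====
def get_used_functions_alt (seqs : List (List String × String)) : List String :=
  -- flat = [func for funcs, _ in seqs for func in funcs];
  -- for i, func in reversed(list(enumerate(flat))): first[func] = i;
  -- [func for func, _ in sorted(first.items(), key=lambda kv: kv[1])]
  (PySem.List.sorted
    ((PySem.List.enumerate (seqs.flatMap (fun p => p.1)) 0).reverse.foldl
      (fun (d : PySem.Dict String Int) q => d.insert q.2 q.1) PySem.Dict.empty).items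
    (fun kv => kv.2) false).map (·.1)

-- ===== PRECONDITION & SPEC =====
def Spec_get_used_functions (seqs : List (List String × String)) (out : List String) : Prop := out = get_used_functions_alt seqs
instance (seqs : List (List String × String)) (out : List String) : Decidable (Spec_get_used_functions seqs out) := by unfold Spec_get_used_functions; infer_instance

-- ===== CLAIM (what is proved, stated in full; the proofs are below) =====
def Claim_equal_get_used_functions : Prop := ∀ (seqs : List (List String × String)), Dom_get_used_functions seqs → Spec_get_used_functions seqs (get_used_functions seqs)

-- ===== LEMMAS AND PROOFS =====

-- A's step function, named for the proofs.
def pvStepA (st : PySem.Set String × List String) (func : String) : PySem.Set String × List String :=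
  if PySem.Set.contains st.1 func then st else (PySem.Set.add st.1 func, st.2 ++ [func])

-- A's nested fold is the fold of pvStepA over the flattened list.
theorem pvFoldA_flat (seqs : List (List String × String)) (st : PySem.Set String × List String) :
    seqs.foldl (fun st p => p.1.foldl pvStepA st) st
    = (seqs.flatMap (fun p => p.1)).foldl pvStepA st := by
  induction seqs generalizing st with
  | nil => rfl
  | cons p t ih => simp only [List.foldl_cons, List.flatMap_cons, List.foldl_append, ih]

-- The enumerated first-occurrence entries of `flat`: (func, index) for each index whose
-- element does not occur earlier.
def pvYs (flat : List String) : List (String × Int) :=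
  ((PySem.List.enumerate flat 0).filter
    (fun q => !((PySem.List.slice flat none (some q.1)).contains q.2))).map (fun q => (q.2, q.1))

-- Invariant for A's fold: with the seen set = set(pre) and flat = pre ++ rest, the fold appends
-- exactly the first-occurrence elements of rest.
theorem pvMain (flat : List String) :
    ∀ (rest pre acc : List String), flat = pre ++ rest →
    (rest.foldl pvStepA (PySem.Set.ofList pre, acc)).2
    = acc ++ ((PySem.List.enumerate rest (pre.length : Int)).filter
        (fun q => !((PySem.List.slice flat none (some q.1)).contains q.2))).map (·.2) := by
  intro rest
  induction rest with
  | nil => intro pre acc _; simp [PySem.List.enumerate]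
  | cons f t ih =>
      intro pre acc hflat
      have hcontains : PySem.Set.contains (PySem.Set.ofList pre) f = pre.contains f := by
        simp [PySem.Set.mem_ofList]
      have hadd : PySem.Set.ofList (pre ++ [f]) = PySem.Set.add (PySem.Set.ofList pre) f := by
        simp [PySem.Set.ofList_eq_foldl]
      have hflat' : flat = (pre ++ [f]) ++ t := by simp [hflat]
      have hlen : ((pre ++ [f]).length : Int) = (pre.length : Int) + 1 := by
        simp
      have htake : flat.take pre.length = pre := by
        rw [hflat]; exact List.take_left ..
      rw [PySem.List.enumerate_cons]
      simp only [List.foldl_cons, pvStepA, hcontains]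
      by_cases h : pre.contains f = true
      · have hmem : f ∈ pre := by simpa using h
        rw [if_pos h]
        have hstate : (PySem.Set.ofList pre, acc)
            = (PySem.Set.ofList (pre ++ [f]), acc) := by
          rw [hadd]; simp only [PySem.Set.add]; rw [hcontains, if_pos h]
        rw [hstate, ih (pre ++ [f]) acc hflat', hlen]
        simp [PySem.List.slice_to_natCast, htake, hmem]
      · have hmem : f ∉ pre := by simpa using h
        rw [if_neg h]
        have hstate : (PySem.Set.add (PySem.Set.ofList pre) f, acc ++ [f])
            = (PySem.Set.ofList (pre ++ [f]), acc ++ [f]) := by rw [hadd]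
        rw [hstate, ih (pre ++ [f]) (acc ++ [f]) hflat', hlen]
        simp [PySem.List.slice_to_natCast, htake, hmem]

-- First-occurrence index of k in l, as a recursion (proof-side notion).
def pvFirst (l : List String) (k : String) : Option Nat :=
  match l with
  | [] => none
  | x :: t => if x = k then some 0 else (pvFirst t k).map (· + 1)

theorem pvFirst_iff (l : List String) (k : String) (j : Nat) :
    pvFirst l k = some j ↔ l[j]? = some k ∧ k ∉ l.take j := by
  induction l generalizing j with
  | nil => simp [pvFirst]
  | cons x t ih =>
      by_cases hx : x = k
      · subst hx
        cases j with
        | zero => simp [pvFirst]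
        | succ m => simp [pvFirst, List.take_succ_cons]
      · cases j with
        | zero => simp [pvFirst, hx]
        | succ m =>
            simp only [pvFirst, if_neg hx, List.getElem?_cons_succ, List.take_succ_cons,
              List.mem_cons]
            constructor
            · intro h
              obtain ⟨j', hj', hplus⟩ := Option.map_eq_some_iff.mp h
              have hj : j' = m := by omega
              subst hj
              have := (ih j').mp hj'
              exact ⟨this.1, by tauto⟩
            · intro ⟨h1, h2⟩
              have : pvFirst t k = some m := (ih m).mpr ⟨h1, by tauto⟩
              simp [this]

-- find? over an enumeration locates exactly the first occurrence.
theorem pvFindEnum (l : List String) (s : Int) (k : String) :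
    (PySem.List.enumerate l s).find? (fun q => q.2 == k)
    = (pvFirst l k).map (fun j => (s + (j : Int), k)) := by
  induction l generalizing s with
  | nil => simp [PySem.List.enumerate, pvFirst]
  | cons x t ih =>
      rw [PySem.List.enumerate_cons]
      by_cases hx : x = k
      · subst hx; simp [pvFirst]
      · rw [List.find?_cons_of_neg (by simpa using hx)]
        rw [ih (s + 1)]
        simp only [pvFirst, if_neg hx]
        cases pvFirst t k with
        | none => rfl
        | some j => simp; ring

-- get? of the backward insert fold = first matching pair of the reversed fold list.
theorem pvGetFold (ps : List (Int × String)) (d : PySem.Dict String Int) (k : String) :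
    (ps.foldl (fun d q => d.insert q.2 q.1) d).get? k
    = match ps.reverse.find? (fun q => q.2 == k) with
      | some q => some q.1
      | none => d.get? k := by
  induction ps generalizing d with
  | nil => simp
  | cons q t ih =>
      rw [List.foldl_cons, ih, List.reverse_cons, List.find?_append]
      cases hf : t.reverse.find? (fun q => q.2 == k) with
      | some r => simp
      | none =>
          by_cases hq : q.2 = k
          · simp [hq, PySem.Dict.get?_insert_self]
          · have hb : (q.2 == k) = false := by simpa using hq
            simp only [Option.none_or, List.find?_cons, hb, List.find?_nil]
            exact PySem.Dict.get?_insert_of_ne (hne := Ne.symm hq) ..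

-- membership in pvYs ↔ first-occurrence characterisation.
theorem pvMemYs (flat : List String) (k : String) (v : Int) :
    (k, v) ∈ pvYs flat ↔ ∃ j : Nat, pvFirst flat k = some j ∧ v = (j : Int) := by
  unfold pvYs
  simp only [List.mem_map, List.mem_filter, PySem.List.mem_enumerate_iff]
  constructor
  · rintro ⟨q, ⟨⟨j, hj, rfl⟩, hpred⟩, heq⟩
    simp only [zero_add] at hpred heq
    obtain ⟨rfl, rfl⟩ := Prod.mk.injEq .. ▸ (by exact And.intro (congrArg Prod.fst heq) (congrArg Prod.snd heq) : (flat[j] = k ∧ (j : Int) = v))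
    refine ⟨j, (pvFirst_iff flat flat[j] j).mpr ⟨by simp, ?_⟩, rfl⟩
    rw [PySem.List.slice_to_natCast] at hpred
    simpa using hpred
  · rintro ⟨j, hfi, rfl⟩
    obtain ⟨hget, hmem⟩ := (pvFirst_iff flat k j).mp hfi
    have hjlt : j < flat.length := by
      by_contra h
      rw [List.getElem?_eq_none (by omega)] at hget
      cases hget
    refine ⟨((j : Int), k), ⟨⟨j, hjlt, by simp [List.getElem?_eq_getElem hjlt] at hget; simp [hget]⟩, ?_⟩, rfl⟩
    simp only []
    rw [PySem.List.slice_to_natCast]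
    simpa using hmem

-- pvYs is strictly increasing in its index component.
theorem pvYs_pairwise (flat : List String) :
    (pvYs flat).Pairwise (fun a b => a.2 < b.2) := by
  unfold pvYs
  apply List.Pairwise.map
  · intro a b h; exact h
  · exact (PySem.List.pairwise_lt_enumerate flat 0).sublist List.filter_sublist

-- ===== VERDICT (by name: the statement is the Claim_ definition above) =====
theorem get_used_functions_spec : Claim_equal_get_used_functions := by
  intro seqs _
  unfold Spec_get_used_functions get_used_functions get_used_functions_alt
  rw [show (fun (st : PySem.Set String × List String) func =>
        if PySem.Set.contains st.1 func then st
        else (PySem.Set.add st.1 func, st.2 ++ [func])) = pvStepA from rfl]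
  rw [pvFoldA_flat]
  have h0 : (PySem.Set.empty, ([] : List String))
      = (PySem.Set.ofList ([] : List String), ([] : List String)) := rfl
  rw [h0, pvMain (seqs.flatMap (fun p => p.1)) (seqs.flatMap (fun p => p.1)) [] [] rfl]
  set flat := seqs.flatMap (fun p => p.1) with hflatdef
  set first := (PySem.List.enumerate flat 0).reverse.foldl
    (fun (d : PySem.Dict String Int) q => d.insert q.2 q.1) PySem.Dict.empty with hfirst
  -- keys of `first` are nodup, hence items are nodup
  have hkeys : first.keys.Nodup := by
    rw [hfirst]
    exact PySem.Dict.nodup_keys_foldl_insert_key ((PySem.List.enumerate flat 0).reverse)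
      (fun q : Int × String => q.2) (fun d q => q.1) PySem.Dict.empty PySem.Dict.nodup_keys_empty
  have hitemsnd : first.items.Nodup :=
    List.Nodup.of_map _ (by simpa only [PySem.Dict.keys] using hkeys)
  have hysnd : (pvYs flat).Nodup :=
    (pvYs_pairwise flat).imp (fun h heq => by rw [heq] at h; exact lt_irrefl _ h)
  have hmemitems : ∀ (k : String) (v : Int), (k, v) ∈ first.items ↔ (k, v) ∈ pvYs flat := by
    intro k v
    rw [← PySem.Dict.get?_eq_some_iff_mem_items first k v hkeys, hfirst, pvGetFold,
      List.reverse_reverse, pvFindEnum, pvMemYs]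
    cases h : pvFirst flat k with
    | none => simp
    | some j => simp [eq_comm]
  have hperm : (pvYs flat).Perm first.items := by
    rw [List.perm_ext_iff_of_nodup hysnd hitemsnd]
    intro ⟨k, v⟩
    exact (hmemitems k v).symm
  have hs : PySem.List.sorted first.items (fun kv => kv.2) false = pvYs flat :=
    PySem.List.sorted_eq_of_perm_of_pairwise_lt first.items (pvYs flat) (fun kv => kv.2) hperm (pvYs_pairwise flat)
  rw [hs]
  simp [pvYs, List.map_map, Function.comp]
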